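-- pv_equiv track=rewrite | github.com/HerBernie/Selenium_Crawler_Amazon | SkuListGenerator.py | simplify_listing_url_zh
-- ===== SOURCE A (Python) =====
-- def simplify_listing_url_zh(url):
--     count = 0
--     urlLength = 0
--     for char in url:
--         if char == '/':
--             count += 1
--         if count == 6:
--             break
--         urlLength += 1
--     return url[:urlLength]
-- ===== SOURCE B (Python) =====
-- def simplify_listing_url_zh(url):
--     return '/'.join(url.split('/')[:6])
-- ===== Notes on version B (the rewrite author's own statement) =====
-- stated objective: idiomatic
-- what changed: Replaces the manual character scan with counter, break and slice by materializing the slash-separated segments with split and rejoining the first six.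
import Mathlib
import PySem

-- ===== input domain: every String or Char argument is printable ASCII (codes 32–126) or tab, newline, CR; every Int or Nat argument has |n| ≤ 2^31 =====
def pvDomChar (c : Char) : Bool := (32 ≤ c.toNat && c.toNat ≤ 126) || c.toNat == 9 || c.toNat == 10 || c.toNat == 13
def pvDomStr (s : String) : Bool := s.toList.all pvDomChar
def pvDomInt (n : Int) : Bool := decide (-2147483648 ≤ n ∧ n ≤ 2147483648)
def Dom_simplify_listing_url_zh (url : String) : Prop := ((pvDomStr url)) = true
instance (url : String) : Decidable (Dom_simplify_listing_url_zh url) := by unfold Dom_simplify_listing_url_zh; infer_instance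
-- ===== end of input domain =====

-- B truncates the URL before its 6th '/' via split/take/join instead of A's manual counting scan; same result on every input.

-- ===== PORT A =====
-- the for-loop of A: state (count, urlLength), break when count reaches 6
def aGo : List Char → Nat → Nat → Nat
  | [], _, len => len
  | ch :: rest, count, len =>
      let count' := if ch = '/' then count + 1 else count
      if count' = 6 then len else aGo rest count' (len + 1)

def simplify_listing_url_zh (url : String) : String :=
  -- url[:urlLength]
  PySem.Str.slice url none (some ((aGo url.toList 0 0 : Nat) : Int))

-- ===== PORT B =====
-- '/'.join(url.split('/')[:6]); split with a non-empty separator is PySem.Chars.splitOn, join is PySem.Chars.join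
def simplify_listing_url_zh_alt (url : String) : String :=
  String.ofList (PySem.Chars.join ['/'] ((PySem.Chars.splitOn url.toList ['/']).take 6))

-- ===== PRECONDITION & SPEC =====
def Spec_simplify_listing_url_zh (url : String) (out : String) : Prop := out = simplify_listing_url_zh_alt url
instance (url : String) (out : String) : Decidable (Spec_simplify_listing_url_zh url out) := by unfold Spec_simplify_listing_url_zh; infer_instance

-- ===== CLAIM (what is proved, stated in full; the proofs are below) =====
def Claim_equal_simplify_listing_url_zh : Prop := ∀ (url : String), Dom_simplify_listing_url_zh url → Spec_simplify_listing_url_zh url (simplify_listing_url_zh url)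

-- ===== LEMMAS AND PROOFS =====

-- structural recursion computing split-on-'/' (proof-side model of PySem.Chars.splitOn)
def splitSlash : List Char → List (List Char)
  | [] => [[]]
  | c :: rest =>
      if c = '/' then [] :: splitSlash rest
      else
        match splitSlash rest with
        | p :: ps => (c :: p) :: ps
        | [] => [[c]]

theorem splitSlash_ne_nil (cs : List Char) : splitSlash cs ≠ [] := by
  cases cs with
  | nil => simp [splitSlash]
  | cons c rest =>
    simp only [splitSlash]
    split
    · simp
    · cases h : splitSlash rest <;> simp

theorem splitOn_go_slash (fuel : Nat) : ∀ (l cur : List Char) (acc : List (List Char)),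
    l.length ≤ fuel →
    PySem.Chars.splitOn.go ['/'] fuel l cur acc =
      acc.reverse ++
        (match splitSlash l with
         | p :: ps => (cur.reverse ++ p) :: ps
         | [] => []) := by
  induction fuel with
  | zero =>
    intro l cur acc h
    have : l = [] := List.length_eq_zero_iff.mp (Nat.le_zero.mp h)
    subst this
    simp [PySem.Chars.splitOn.go, splitSlash]
  | succ fuel ih =>
    intro l cur acc h
    cases l with
    | nil => simp [PySem.Chars.splitOn.go, splitSlash]
    | cons c rest =>
      by_cases hc : c = '/'
      · subst hc
        rw [show PySem.Chars.splitOn.go ['/'] (fuel+1) ('/' :: rest) cur acc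
              = PySem.Chars.splitOn.go ['/'] fuel rest [] (cur.reverse :: acc) by
            simp [PySem.Chars.splitOn.go, List.isPrefixOf]]
        rw [ih rest [] (cur.reverse :: acc) (by simpa using Nat.le_of_succ_le_succ h)]
        have hne := splitSlash_ne_nil rest
        cases hsp : splitSlash rest with
        | nil => exact absurd hsp hne
        | cons p ps => simp [splitSlash, hsp]
      · rw [show PySem.Chars.splitOn.go ['/'] (fuel+1) (c :: rest) cur acc
              = PySem.Chars.splitOn.go ['/'] fuel rest (c :: cur) acc by
            simp [PySem.Chars.splitOn.go, List.isPrefixOf]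
            exact fun h' => absurd h'.symm hc]
        rw [ih rest (c :: cur) acc (by simpa using Nat.le_of_succ_le_succ h)]
        have hne := splitSlash_ne_nil rest
        cases hsp : splitSlash rest with
        | nil => exact absurd hsp hne
        | cons p ps => simp [splitSlash, hc, hsp]

theorem splitOn_slash (cs : List Char) : PySem.Chars.splitOn cs ['/'] = splitSlash cs := by
  rw [PySem.Chars.splitOn, splitOn_go_slash (cs.length + 1) cs [] [] (Nat.le_succ _)]
  have hne := splitSlash_ne_nil cs
  cases hsp : splitSlash cs with
  | nil => exact absurd hsp hne
  | cons p ps => simp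

-- join with '/' of a list whose head starts with c = c consed onto the join with that head beheaded
theorem join_cons_head (c : Char) (p : List Char) (qs : List (List Char)) :
    PySem.Chars.join ['/'] ((c :: p) :: qs) = c :: PySem.Chars.join ['/'] (p :: qs) := by
  cases qs with
  | nil => rw [PySem.Chars.join_singleton, PySem.Chars.join_singleton]
  | cons q qs => rw [PySem.Chars.join_cons_cons, PySem.Chars.join_cons_cons]; simp

theorem join_nil_head (q : List Char) (qs : List (List Char)) :
    PySem.Chars.join ['/'] ([] :: q :: qs) = '/' :: PySem.Chars.join ['/'] (q :: qs) := by
  rw [PySem.Chars.join_cons_cons]; simp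

-- the loop accumulator only shifts the result
theorem aGo_acc (cs : List Char) : ∀ (count len : Nat), aGo cs count len = len + aGo cs count 0 := by
  induction cs with
  | nil => intro count len; simp [aGo]
  | cons c rest ih =>
    intro count len
    simp only [aGo]
    by_cases h6 : (if c = '/' then count + 1 else count) = 6
    · rw [if_pos h6, if_pos h6]; omega
    · rw [if_neg h6, if_neg h6]
      have h1 := ih (if c = '/' then count + 1 else count) (len + 1)
      have h2 := ih (if c = '/' then count + 1 else count) (0 + 1)
      omega

-- main invariant: with k (1 ≤ k ≤ 6) slashes still allowed, the loop's prefix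
-- equals the join of the first k split segments
theorem main_lemma (cs : List Char) : ∀ (k : Nat), 1 ≤ k → k ≤ 6 →
    cs.take (aGo cs (6 - k) 0) = PySem.Chars.join ['/'] ((splitSlash cs).take k) := by
  induction cs with
  | nil =>
    intro k hk1 hk6
    cases k with
    | zero => omega
    | succ k => simp [aGo, splitSlash, PySem.Chars.join_singleton]
  | cons c rest ih =>
    intro k hk1 hk6
    obtain ⟨k', rfl⟩ : ∃ k', k = k' + 1 := ⟨k - 1, by omega⟩
    obtain ⟨p, ps, hsp⟩ : ∃ p ps, splitSlash rest = p :: ps := by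
      cases h : splitSlash rest with
      | nil => exact absurd h (splitSlash_ne_nil rest)
      | cons p ps => exact ⟨p, ps, rfl⟩
    by_cases hc : c = '/'
    · subst hc
      have hsplit : splitSlash ('/' :: rest) = [] :: splitSlash rest := by simp [splitSlash]
      by_cases hk : k' = 0
      · subst hk
        have hstep : aGo ('/' :: rest) (6 - 1) 0 = 0 := by simp [aGo]
        rw [hstep, hsplit, List.take_zero, List.take_succ_cons, List.take_zero,
            PySem.Chars.join_singleton]
      · obtain ⟨k'', rfl⟩ : ∃ k'', k' = k'' + 1 := ⟨k' - 1, by omega⟩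
        have hstep : aGo ('/' :: rest) (6 - (k'' + 1 + 1)) 0 = aGo rest (6 - (k'' + 1)) 0 + 1 := by
          simp only [aGo, if_pos rfl]
          rw [show 6 - (k'' + 1 + 1) + 1 = 6 - (k'' + 1) by omega]
          simp only [if_true]
          rw [if_neg (show ¬ 6 - (k'' + 1) = 6 by omega), aGo_acc]
          omega
        have hIH := ih (k'' + 1) (by omega) (by omega)
        rw [hsp, List.take_succ_cons] at hIH
        rw [hstep, hsplit, List.take_succ_cons, List.take_succ_cons, hsp,
            List.take_succ_cons, join_nil_head, ← hIH]
    · have hsplit : splitSlash (c :: rest) = (c :: p) :: ps := by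
        simp [splitSlash, hc, hsp]
      have hstep : aGo (c :: rest) (6 - (k' + 1)) 0 = aGo rest (6 - (k' + 1)) 0 + 1 := by
        simp only [aGo, if_neg hc]
        rw [if_neg (show ¬ 6 - (k' + 1) = 6 by omega), aGo_acc]
        omega
      have hIH := ih (k' + 1) hk1 hk6
      rw [hsp, List.take_succ_cons] at hIH
      rw [hstep, hsplit, List.take_succ_cons, List.take_succ_cons, join_cons_head, ← hIH]

-- ===== VERDICT (by name: the statement is the Claim_ definition above) =====
theorem simplify_listing_url_zh_spec : Claim_equal_simplify_listing_url_zh := by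
  intro url _
  unfold Spec_simplify_listing_url_zh simplify_listing_url_zh simplify_listing_url_zh_alt
  rw [splitOn_slash]
  have h := main_lemma url.toList 6 (by omega) (by omega)
  simp only [Nat.sub_self] at h
  have hA : (PySem.Str.slice url none (some ((aGo url.toList 0 0 : Nat) : Int))).toList
      = url.toList.take (aGo url.toList 0 0) := by
    rw [PySem.Str.toList_slice]
    simp [PySem.Chars.slice_eq_listSlice, PySem.List.slice_to_natCast]
  have h2 := congrArg String.ofList hA
  rw [String.ofList_toList] at h2
  rw [h2, h]
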